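-- pv_equiv track=rewrite | github.com/thomsoren/Algdat | Studsort.py | max_permutations
-- ===== SOURCE A (Python) =====
-- def find_cycle(M, start, visited, stack):
--     # Rekursiv funksjon som finner sykler i en rettet graf
--     if visited[start]:
--         # Hvis vi besøker en node som allerede er besøkt, er det sykel
--         if start in stack:
--             sykel_index = stack.index(start)
--             sykel = stack[sykel_index:]
--
--             # Skjekker at ingen er i sin favoritt posisjon
--             for c in sykel:
--                 if M[c] == c:
--                     break
--             else:
--                 return set(sykel)
--             return set()
--
--     visited[start] = True
--     stack.append(start)
--     neste_node = M[start]
--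
--     # Rekursivt til neste node
--     sykel = find_cycle(M, neste_node, visited, stack)
--     stack.pop()
--     return sykel
--
-- def max_permutations(M):
--     n = len(M)
--     visited = [False] * n
--     result = set()
--
--     for i in range(n):
--         if not visited[i]:
--             sykel = find_cycle(M, i, visited, [])
--             result.update(sykel)
--
--     return result
-- ===== SOURCE B (Python) =====
-- def max_permutations(M):
--     # For each start, advance 2*n steps along M to land on a cycle, then walk
--     # that cycle once collecting its nodes; skip one-node cycles (M[t] == t).
--     n = len(M)
--     result = set()
--     for i in range(n):
--         t = i
--         for _ in range(2 * n):
--             t = M[t]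
--         if M[t] != t:
--             c = t
--             while True:
--                 result.add(c)
--                 c = M[c]
--                 if c == t:
--                     break
--     return result
-- ===== Notes on version B (the rewrite author's own statement) =====
-- stated objective: simpler
-- what changed: B replaces A's recursive DFS with visited/stack bookkeeping and slice-based cycle extraction by a direct walk: advance 2*len(M) steps along M to land on the cycle reachable from each start, then traverse that cycle once collecting its nodes unless it is a self-loop.
import Mathlib
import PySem

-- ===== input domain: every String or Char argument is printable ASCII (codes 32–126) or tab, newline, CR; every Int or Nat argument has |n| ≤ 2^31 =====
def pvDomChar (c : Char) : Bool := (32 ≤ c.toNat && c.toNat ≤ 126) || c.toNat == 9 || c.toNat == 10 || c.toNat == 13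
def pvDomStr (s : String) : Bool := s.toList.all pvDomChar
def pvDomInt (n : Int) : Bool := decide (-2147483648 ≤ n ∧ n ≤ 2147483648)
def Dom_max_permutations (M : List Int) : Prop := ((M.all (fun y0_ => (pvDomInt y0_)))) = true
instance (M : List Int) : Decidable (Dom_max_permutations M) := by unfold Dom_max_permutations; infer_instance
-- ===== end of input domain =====

-- B replaces A's recursive DFS (visited/stack bookkeeping, slice-based cycle extraction) by
-- a direct walk: advance 2*len(M) steps to land on a cycle, then collect that cycle once;
-- objective: simpler.  Both Pythons return a set; each port returns its canonical ascending
-- list of the distinct elements (Python set iteration order is not modelled, results are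
-- compared as finite sets).
-- A mutates its local `visited`/`stack` lists only; the caller's argument M is untouched.

-- ===== PORT A =====
-- the `for c in sykel: if M[c] == c: break / else` check: some true = broke out (a fixed
-- point was found), some false = fell through, none = IndexError reading M[c]
def pvCheckFixed (M : List Int) : List Int → Option Bool
  | [] => some false
  | c :: rest =>
    match PySem.List.pyGet? M c with
    | none => none
    | some v => if v == c then some true else pvCheckFixed M rest

-- find_cycle(M, start, visited, stack); fuel makes the recursion structural (the call
-- chain pushes pairwise-distinct labels from [-len(M), len(M)), so depth ≤ 2*len(M)+1 and
-- the fuel 2*len(M)+2 used below is never exhausted); none = IndexError.  Python mutates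
-- `visited` in place, so the port returns the updated visited list; `stack` is appended
-- then popped, so the caller's stack is unchanged and need not be returned.
def pvFindCycle (M : List Int) : Nat → Int → List Bool → List Int → Option (List Int × List Bool)
  | 0, _, _, _ => none
  | fuel + 1, start, visited, stack =>
    match PySem.List.pyGet? visited start with
    | none => none
    | some vis =>
      if vis && stack.contains start then
        match PySem.List.index? stack start with
        | none => none
        | some idx =>
          let sykel := PySem.List.slice stack (some (idx : Int)) none
          match pvCheckFixed M sykel with
          | none => none
          | some b => some (if b then PySem.Set.empty else PySem.Set.ofList sykel, visited)
      else
        let visited' := PySem.List.pySetD visited start true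
        match PySem.List.pyGet? M start with
        | none => none
        | some neste => pvFindCycle M fuel neste visited' (stack ++ [start])

def max_permutations (M : List Int) : List Int :=
  let n := M.length
  let out := (PySem.List.pyRange 0 (n : Int) 1).foldl
    (fun (acc : List Int × List Bool) (i : Int) =>
      match PySem.List.pyGet? acc.2 i with
      | none => acc
      | some vis =>
        if vis then acc
        else
          match pvFindCycle M (2 * n + 2) i acc.2 [] with
          | none => acc
          | some (sykel, visited') => (PySem.Set.update acc.1 sykel, visited'))
    (PySem.Set.empty, List.replicate n false)
  PySem.List.sorted out.1 (fun x => x) false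

-- ===== PORT B =====
-- `for _ in range(k): t = M[t]` (where Python raises IndexError the port keeps t; that
-- lies outside Pre_)
def pvAdvance (M : List Int) : Int → Nat → Int
  | t, 0 => t
  | t, k + 1 =>
    match PySem.List.pyGet? M t with
    | none => t
    | some t' => pvAdvance M t' k

-- the do-while collection of the cycle through t: add c, step, stop on returning to t;
-- fuel 2*len(M) dominates the cycle length under Pre_ (none-case of the lookup keeps the
-- partial result; Python raises IndexError there, outside Pre_)
def pvCollect (M : List Int) (t : Int) : Int → List Int → Nat → List Int
  | _, result, 0 => result
  | c, result, fuel + 1 =>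
    let result' := PySem.Set.add result c
    match PySem.List.pyGet? M c with
    | none => result'
    | some c' => if c' == t then result' else pvCollect M t c' result' fuel

def max_permutations_alt (M : List Int) : List Int :=
  let n := M.length
  let out := (PySem.List.pyRange 0 (n : Int) 1).foldl
    (fun (result : List Int) (i : Int) =>
      let t := pvAdvance M i (2 * n)
      match PySem.List.pyGet? M t with
      | none => result
      | some mt => if mt == t then result else pvCollect M t t result (2 * n))
    PySem.Set.empty
  PySem.List.sorted out (fun x => x) false

-- ===== PRECONDITION & SPEC =====
-- Pre_ is exactly the inputs on which A returns normally: every value is a valid Python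
-- index into M (negative values index from the end, as both programs' raw M[·] lookups do);
-- outside Pre_ both programs raise IndexError.
def Pre_max_permutations (M : List Int) : Prop :=
  ∀ v ∈ M, -(M.length : Int) ≤ v ∧ v < (M.length : Int)
instance (M : List Int) : Decidable (Pre_max_permutations M) := by
  unfold Pre_max_permutations; infer_instance

def pvWitness_max_permutations : List Int := [1, 2, 0]

def Spec_max_permutations (M : List Int) (out : List Int) : Prop := out = max_permutations_alt M
instance (M : List Int) (out : List Int) : Decidable (Spec_max_permutations M out) := by
  unfold Spec_max_permutations; infer_instance

-- ===== CLAIM (what is proved, stated in full; the proofs are below) =====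
def Claim_equal_max_permutations : Prop :=
  ∀ (M : List Int), Dom_max_permutations M → Pre_max_permutations M →
    Spec_max_permutations M (max_permutations M)

-- ===== LEMMAS AND PROOFS =====

-- the successor function on labels (total form of the raw Python lookup M[j])
def pvSig (M : List Int) (j : Int) : Int := (PySem.List.pyGet? M j).getD 0
-- valid labels: any int that indexes M without raising
def pvInR (M : List Int) (x : Int) : Prop := -(M.length : Int) ≤ x ∧ x < (M.length : Int)
-- the physical slot a label reads/writes (Python's negative-index resolution)
def pvSlot (n : ℕ) (x : Int) : ℕ := (if x < 0 then x + n else x).toNat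
-- v lies on a σ-cycle
def pvOnCycle (M : List Int) (v : Int) : Prop := ∃ L, 1 ≤ L ∧ (pvSig M)^[L] v = v
-- v is in the intended answer: on a cycle and not a fixed point
def pvGood (M : List Int) (v : Int) : Prop := pvInR M v ∧ pvOnCycle M v ∧ pvSig M v ≠ v

lemma pvGet_slot {α : Type} (xs : List α) (x : Int)
    (h0 : -(xs.length : Int) ≤ x) (h1 : x < (xs.length : Int)) :
    PySem.List.pyGet? xs x = xs[pvSlot xs.length x]? := by
  by_cases hneg : x < 0
  · have hk : x = -((((-x).toNat : ℕ)) : Int) := by omega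
    rw [hk, PySem.List.pyGet?_neg_natCast xs (-x).toNat (by omega) (by omega)]
    congr 1
    simp only [pvSlot]
    rw [if_pos (by omega : -((((-x).toNat : ℕ)) : Int) < 0)]
    omega
  · rw [PySem.List.pyGet?_of_nonneg xs (by omega)]
    congr 1
    simp only [pvSlot]
    rw [if_neg hneg]

lemma pvGet_some {α : Type} (xs : List α) (x : Int)
    (h0 : -(xs.length : Int) ≤ x) (h1 : x < (xs.length : Int)) :
    ∃ v, PySem.List.pyGet? xs x = some v := by
  rw [pvGet_slot xs x h0 h1]
  have hs : pvSlot xs.length x < xs.length := by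
    simp only [pvSlot]
    split_ifs <;> omega
  exact ⟨_, List.getElem?_eq_getElem hs⟩

lemma pvSig_get {M : List Int} (hM : Pre_max_permutations M) {x : Int} (hx : pvInR M x) :
    PySem.List.pyGet? M x = some (pvSig M x) ∧ pvInR M (pvSig M x) := by
  obtain ⟨v, hv⟩ := pvGet_some M x hx.1 hx.2
  have hvmem := PySem.List.mem_of_pyGet?_eq_some M hv
  have hsig : pvSig M x = v := by simp [pvSig, hv]
  exact ⟨by rw [hsig]; exact hv, by rw [hsig]; exact hM v hvmem⟩

lemma pvSig_slotEq {M : List Int} {x y : Int}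
    (hx : pvInR M x) (hy : pvInR M y) (h : pvSlot M.length x = pvSlot M.length y) :
    pvSig M x = pvSig M y := by
  simp only [pvSig, pvGet_slot M x hx.1 hx.2, pvGet_slot M y hy.1 hy.2, h]

lemma pvSlot_lt {M : List Int} {x : Int} (hx : pvInR M x) : pvSlot M.length x < M.length := by
  obtain ⟨h0, h1⟩ := hx
  simp only [pvSlot]
  split_ifs <;> omega

lemma pvSlot_natCast {M : List Int} {x : Int} (hx : pvInR M x) :
    pvInR M ((pvSlot M.length x : ℕ) : Int) ∧
      pvSlot M.length ((pvSlot M.length x : ℕ) : Int) = pvSlot M.length x := by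
  have hlt := pvSlot_lt hx
  set k := pvSlot M.length x with hk
  refine ⟨⟨by omega, by omega⟩, ?_⟩
  simp only [pvSlot]
  rw [if_neg (by omega : ¬ ((k : Int) < 0))]
  exact Int.toNat_natCast k

lemma pvGet_set_slot (visited : List Bool) (s x : Int)
    (hs0 : -(visited.length : Int) ≤ s) (hs1 : s < (visited.length : Int))
    (hx0 : -(visited.length : Int) ≤ x) (hx1 : x < (visited.length : Int)) :
    PySem.List.pyGet? (PySem.List.pySetD visited s true) x
      = if pvSlot visited.length x = pvSlot visited.length s then some true
        else PySem.List.pyGet? visited x := by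
  have hset : PySem.List.pySetD visited s true = visited.set (pvSlot visited.length s) true := by
    by_cases hneg : s < 0
    · simp only [PySem.List.pySetD, PySem.List.pySet?, PySem.List.pyIdx?, pvSlot]
      rw [if_neg (by omega), if_pos (by omega : -(visited.length : Int) ≤ s), if_pos hneg]
      simp only [Option.map_some, Option.getD_some]
      congr 1
      omega
    · simp only [PySem.List.pySetD, PySem.List.pySet?, PySem.List.pyIdx?, pvSlot]
      rw [if_pos (by omega : (0:Int) ≤ s), if_pos hs1, if_neg hneg]
      simp
  have hslt : pvSlot visited.length s < visited.length := by
    simp only [pvSlot]; split_ifs <;> omega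
  have hxlt : pvSlot visited.length x < visited.length := by
    simp only [pvSlot]; split_ifs <;> omega
  rw [hset, pvGet_slot _ x (by simpa using hx0) (by simpa using hx1),
    pvGet_slot visited x hx0 hx1]
  simp only [List.length_set]
  rw [List.getElem?_set]
  by_cases hxs : pvSlot visited.length x = pvSlot visited.length s
  · rw [if_pos hxs, if_pos hxs.symm, if_pos hslt]
  · rw [if_neg hxs, if_neg (fun h => hxs h.symm)]

lemma pvIter_inR {M : List Int} (hM : Pre_max_permutations M) {x : Int} (hx : pvInR M x) :
    ∀ k, pvInR M ((pvSig M)^[k] x) := by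
  intro k
  induction k generalizing x with
  | zero => simpa using hx
  | succ k ih =>
    rw [Function.iterate_succ_apply]
    exact ih (pvSig_get hM hx).2

lemma pvIterate_mod {α : Type} (f : α → α) (p : ℕ) (_hp : 1 ≤ p) (s : α)
    (hf : f^[p] s = s) (m : ℕ) : f^[m] s = f^[m % p] s := by
  conv_lhs => rw [show m = m % p + p * (m / p) from (Nat.mod_add_div m p).symm]
  rw [Function.iterate_add_apply, Function.iterate_mul]
  rw [Function.iterate_fixed hf]

lemma pvStackLen {M : List Int} (stack : List Int)
    (h1 : ∀ x ∈ stack, pvInR M x) (h2 : stack.Nodup) : stack.length ≤ 2 * M.length := by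
  classical
  have hsub : stack.toFinset ⊆ Finset.Icc (-(M.length : Int)) ((M.length : Int) - 1) := by
    intro y hy
    rw [List.mem_toFinset] at hy
    obtain ⟨hy1, hy2⟩ := h1 y hy
    simp only [Finset.mem_Icc]
    omega
  have hcard := Finset.card_le_card hsub
  rw [List.toFinset_card_of_nodup h2, Int.card_Icc] at hcard
  omega

lemma pvCheckFixed_spec {M : List Int} (hM : Pre_max_permutations M) :
    ∀ (C : List Int), (∀ c ∈ C, pvInR M c) →
    ∃ b, pvCheckFixed M C = some b ∧ (b = true ↔ ∃ c ∈ C, pvSig M c = c) := by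
  intro C
  induction C with
  | nil => intro _; exact ⟨false, rfl, by simp⟩
  | cons c rest ih =>
    intro hC
    have hc := pvSig_get hM (hC c (by simp))
    by_cases hfix : pvSig M c = c
    · refine ⟨true, ?_, by simp [hfix]⟩
      simp [pvCheckFixed, hc.1, hfix]
    · obtain ⟨b, hb, hiff⟩ := ih (fun x hx => hC x (by simp [hx]))
      refine ⟨b, ?_, ?_⟩
      · simpa [pvCheckFixed, hc.1, hfix] using hb
      · rw [hiff]
        constructor
        · rintro ⟨x, hx, h⟩; exact ⟨x, by simp [hx], h⟩
        · rintro ⟨x, hx, h⟩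
          rcases List.mem_cons.mp hx with rfl | hx'
          · exact absurd h hfix
          · exact ⟨x, hx', h⟩

-- two equal iterates of a cycle node yield a period of their distance
lemma pvPeriod_of_collision {α : Type} (f : α → α) {v : α} {L0 a b : ℕ}
    (hfix : f^[L0] v = v) (ha : a ≤ L0) (hab : a < b) (heq : f^[a] v = f^[b] v) :
    f^[b - a] v = v := by
  have h1 : f^[(L0 - a) + a] v = v := by
    rw [show (L0 - a) + a = L0 by omega]; exact hfix
  have h2 : f^[(L0 - a) + b] v = v := by
    calc f^[(L0 - a) + b] v = f^[L0 - a] (f^[b] v) := Function.iterate_add_apply f _ _ v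
    _ = f^[L0 - a] (f^[a] v) := by rw [heq]
    _ = f^[(L0 - a) + a] v := (Function.iterate_add_apply f _ _ v).symm
    _ = v := h1
  have h3 : f^[(b - a) + L0] v = v := by
    rw [show (b - a) + L0 = (L0 - a) + b by omega]; exact h2
  calc f^[b - a] v = f^[b - a] (f^[L0] v) := by rw [hfix]
  _ = f^[(b - a) + L0] v := (Function.iterate_add_apply f _ _ v).symm
  _ = v := h3

-- pigeonhole on the 2*len(M) possible labels: some two of the first 2n+1 iterates agree
lemma pvCollision {M : List Int} (hM : Pre_max_permutations M) {v : Int} (hv : pvInR M v) :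
    ∃ a b, a < b ∧ b ≤ 2 * M.length ∧ (pvSig M)^[a] v = (pvSig M)^[b] v := by
  classical
  have hn : 1 ≤ M.length := by
    obtain ⟨h0, h1⟩ := hv
    omega
  have hmaps : ∀ k ∈ Finset.range (2 * M.length + 1),
      (pvSig M)^[k] v ∈ Finset.Icc (-(M.length : Int)) ((M.length : Int) - 1) := by
    intro k _
    have := pvIter_inR hM hv k
    obtain ⟨ha, hb⟩ := this
    simp only [Finset.mem_Icc]
    omega
  obtain ⟨a, ha, b, hb, hab, heq⟩ :=
    Finset.exists_ne_map_eq_of_card_lt_of_maps_to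
      (by rw [Finset.card_range, Int.card_Icc]; omega) hmaps
  simp only [Finset.mem_range] at ha hb
  rcases Nat.lt_or_ge a b with hlt | hge
  · exact ⟨a, b, hlt, by omega, heq⟩
  · exact ⟨b, a, by omega, by omega, heq.symm⟩

lemma pvOnCycle_iter {M : List Int} {x : Int} (hx : pvOnCycle M x) (k : ℕ) :
    pvOnCycle M ((pvSig M)^[k] x) := by
  obtain ⟨L, hL, hfix⟩ := hx
  refine ⟨L, hL, ?_⟩
  rw [← Function.iterate_add_apply, Nat.add_comm, Function.iterate_add_apply, hfix]

-- after 2*len(M) steps the walk has necessarily entered its cycle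
lemma pvOnCycle_advance {M : List Int} (hM : Pre_max_permutations M) {i : Int}
    (hi : pvInR M i) : pvOnCycle M ((pvSig M)^[2 * M.length] i) := by
  obtain ⟨a, b, hab, hb, heq⟩ := pvCollision hM hi
  have hcyc : pvOnCycle M ((pvSig M)^[a] i) := by
    refine ⟨b - a, by omega, ?_⟩
    rw [← Function.iterate_add_apply, show b - a + a = b by omega]
    exact heq.symm
  have := pvOnCycle_iter hcyc (2 * M.length - a)
  rwa [← Function.iterate_add_apply, show 2 * M.length - a + a = 2 * M.length by omega]
    at this

lemma pvAdvance_spec {M : List Int} (hM : Pre_max_permutations M) :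
    ∀ (k : ℕ) (t : Int), pvInR M t → pvAdvance M t k = (pvSig M)^[k] t := by
  intro k
  induction k with
  | zero => intro t _; rfl
  | succ k ih =>
    intro t ht
    have hg := pvSig_get hM ht
    rw [Function.iterate_succ_apply, ← ih (pvSig M t) hg.2]
    simp [pvAdvance, hg.1]

-- a cycle node has a minimal return time, and it is at most 2*len(M)
lemma pvMinPeriod {M : List Int} (hM : Pre_max_permutations M) {t : Int}
    (ht : pvInR M t) (hc : pvOnCycle M t) :
    ∃ d, 1 ≤ d ∧ d ≤ 2 * M.length ∧ (pvSig M)^[d] t = t ∧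
      (∀ j, 1 ≤ j → j < d → (pvSig M)^[j] t ≠ t) := by
  classical
  obtain ⟨L, hL, hfix⟩ := hc
  have hex : ∃ k, 1 ≤ k ∧ (pvSig M)^[k] t = t := ⟨L, hL, hfix⟩
  obtain ⟨hd1, hdfix⟩ := Nat.find_spec hex
  have hdmin : ∀ j, 1 ≤ j → j < Nat.find hex → (pvSig M)^[j] t ≠ t := by
    intro j hj1 hjd hjfix
    exact Nat.find_min hex hjd ⟨hj1, hjfix⟩
  refine ⟨Nat.find hex, hd1, ?_, hdfix, hdmin⟩
  have hnodup : ((List.range (Nat.find hex)).map (fun j => (pvSig M)^[j] t)).Nodup := by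
    refine List.Nodup.map_on ?_ List.nodup_range
    intro a ha b hb heqq
    rw [List.mem_range] at ha hb
    by_contra hne
    rcases lt_trichotomy a b with h | h | h
    · have hper := pvPeriod_of_collision (pvSig M) hdfix (by omega) h heqq
      exact hdmin (b - a) (by omega) (by omega) hper
    · exact hne h
    · have hper := pvPeriod_of_collision (pvSig M) hdfix (by omega) h heqq.symm
      exact hdmin (a - b) (by omega) (by omega) hper
  have hlen := pvStackLen ((List.range (Nat.find hex)).map (fun j => (pvSig M)^[j] t))
    (by
      intro x hx
      rw [List.mem_map] at hx
      obtain ⟨j, -, rfl⟩ := hx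
      exact pvIter_inR hM ht j)
    hnodup
  simpa using hlen
lemma pvFindCycle_spec {M : List Int} (hM : Pre_max_permutations M) :
    ∀ (fuel : ℕ) (stack : List Int) (visited : List Bool) (start : Int),
    visited.length = M.length →
    pvInR M start →
    (∀ x ∈ stack, pvInR M x) →
    stack.Nodup →
    (∀ x ∈ stack, PySem.List.pyGet? visited x = some true) →
    (∀ j : ℕ, j ≤ stack.length →
        (stack ++ [start]).getD j 0 = (pvSig M)^[j] ((stack ++ [start]).getD 0 0)) →
    2 * M.length + 2 ≤ fuel + stack.length →
    ∃ S visited',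
      pvFindCycle M fuel start visited stack = some (S, visited') ∧
      (∀ v, v ∈ S ↔ (∃ m, (pvSig M)^[m] start = v) ∧ pvOnCycle M v ∧ pvSig M v ≠ v) ∧
      visited'.length = visited.length ∧
      (∀ x, pvInR M x → PySem.List.pyGet? visited x = some true →
          PySem.List.pyGet? visited' x = some true) ∧
      (∀ x, pvInR M x → PySem.List.pyGet? visited' x = some true →
          PySem.List.pyGet? visited x = some true ∨
            ∃ m, pvSlot M.length ((pvSig M)^[m] start) = pvSlot M.length x) ∧
      PySem.List.pyGet? visited' start = some true ∧
      (∀ v, (∃ m, (pvSig M)^[m] start = v) → pvOnCycle M v →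
          PySem.List.pyGet? visited' v = some true) := by
  intro fuel
  induction fuel with
  | zero =>
    intro stack visited start hlen hstart hstackR hnd hmark hchain hfuel
    exfalso
    have := pvStackLen stack hstackR hnd
    omega
  | succ fuel ih =>
    intro stack visited start hlen hstart hstackR hnd hmark hchain hfuel
    obtain ⟨hs0, hs1⟩ := hstart
    by_cases hin : start ∈ stack
    · -- start is already on the stack: a cycle has been closed
      have hvis : PySem.List.pyGet? visited start = some true := hmark start hin
      have hcont : stack.contains start = true := List.contains_iff_mem.mpr hin
      obtain ⟨idx, hidx⟩ := Option.isSome_iff_exists.mp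
        ((PySem.List.index?_isSome_iff stack start).mpr hin)
      obtain ⟨hidxlt, hidxeq, -⟩ := PySem.List.getElem_of_index?_eq_some hidx
      have hslice : PySem.List.slice stack (some (idx : Int)) none = stack.drop idx :=
        PySem.List.slice_from_natCast stack idx
      have hClen : (stack.drop idx).length = stack.length - idx := by simp
      have hClen1 : 1 ≤ (stack.drop idx).length := by omega
      have hstackE : ∀ (k : ℕ), (hk : k < stack.length) →
          stack[k] = (pvSig M)^[k] ((stack ++ [start]).getD 0 0) := by
        intro k hk
        have h1 := hchain k (by omega)
        rwa [List.getD_eq_getElem _ _ (by simp; omega),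
          List.getElem_append_left hk] at h1
      have hstartE : start = (pvSig M)^[stack.length] ((stack ++ [start]).getD 0 0) := by
        have h1 := hchain stack.length (by omega)
        rwa [List.getD_eq_getElem _ _ (by simp),
          List.getElem_concat_length rfl] at h1
      have hidxE : start = (pvSig M)^[idx] ((stack ++ [start]).getD 0 0) := by
        have h := hstackE idx hidxlt
        rw [hidxeq] at h
        exact h
      obtain ⟨h0, hh0⟩ : ∃ h0, (stack ++ [start]).getD 0 0 = h0 := ⟨_, rfl⟩
      rw [hh0] at hstackE hstartE hidxE
      have hC1 : ∀ (j : ℕ), (hj : j < (stack.drop idx).length) →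
          (stack.drop idx)[j] = (pvSig M)^[j] start := by
        intro j hj
        have hd : (stack.drop idx)[j] = stack[idx + j]'(by omega) := List.getElem_drop
        rw [hd, hstackE (idx + j) (by omega), hidxE, ← Function.iterate_add_apply,
          Nat.add_comm j idx]
      have hC2 : (pvSig M)^[(stack.drop idx).length] start = start := by
        conv_lhs => rw [hidxE, ← Function.iterate_add_apply]
        rw [show (stack.drop idx).length + idx = stack.length by omega, ← hstartE]
      have hCmem : ∀ m : ℕ, (pvSig M)^[m] start ∈ stack.drop idx := by
        intro m
        rw [pvIterate_mod (pvSig M) (stack.drop idx).length hClen1 start hC2 m,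
          ← hC1 (m % (stack.drop idx).length) (Nat.mod_lt _ (by omega))]
        exact List.getElem_mem _
      have hCiff : ∀ v, v ∈ stack.drop idx ↔ ∃ m : ℕ, (pvSig M)^[m] start = v := by
        intro v
        constructor
        · intro hv
          obtain ⟨j, hj, rfl⟩ := List.mem_iff_getElem.mp hv
          exact ⟨j, (hC1 j hj).symm⟩
        · rintro ⟨m, rfl⟩
          exact hCmem m
      have hCR : ∀ c ∈ stack.drop idx, pvInR M c :=
        fun c hc => hstackR c (List.mem_of_mem_drop hc)
      obtain ⟨b, hb, hbiff⟩ := pvCheckFixed_spec hM (stack.drop idx) hCR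
      refine ⟨if b then PySem.Set.empty else PySem.Set.ofList (stack.drop idx),
        visited, ?_, ?_, rfl, fun x _ h => h, fun x _ h => Or.inl h, hvis, ?_⟩
      · simp only [pvFindCycle, hvis, hcont, Bool.true_and, Bool.and_true, if_true,
          hidx, hslice, hb]
      · intro v
        by_cases hbt : b = true
        · obtain ⟨c, hcC, hcfix⟩ := hbiff.mp hbt
          obtain ⟨j, hj, hjc⟩ := List.mem_iff_getElem.mp hcC
          have hc' : (pvSig M)^[j] start = c := by rw [← hjc, hC1 j hj]
          have hcstart : start = c := by
            have h3 : (pvSig M)^[((stack.drop idx).length - j) + j] start = start := by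
              rw [show (stack.drop idx).length - j + j = (stack.drop idx).length by omega]
              exact hC2
            rw [Function.iterate_add_apply, hc', Function.iterate_fixed hcfix] at h3
            exact h3.symm
          rw [if_pos hbt]
          constructor
          · intro hv
            simp [PySem.Set.empty] at hv
          · rintro ⟨⟨m, hm⟩, hcyc, hne⟩
            exfalso
            apply hne
            have hvc : v = c := by
              rw [← hm, hcstart, Function.iterate_fixed hcfix]
            rw [hvc, hcfix]
        · rw [if_neg hbt, PySem.Set.mem_ofList]
          have hnofix : ∀ c ∈ stack.drop idx, pvSig M c ≠ c := by
            intro c hc hfix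
            exact hbt (hbiff.mpr ⟨c, hc, hfix⟩)
          constructor
          · intro hv
            obtain ⟨m, hm⟩ := (hCiff v).mp hv
            refine ⟨⟨m, hm⟩, ⟨(stack.drop idx).length, hClen1, ?_⟩, hnofix v hv⟩
            rw [← hm, ← Function.iterate_add_apply, Nat.add_comm,
              Function.iterate_add_apply, hC2]
          · rintro ⟨hreach, -, -⟩
            exact (hCiff v).mpr hreach
      · rintro v ⟨m, hm⟩ -
        apply hmark
        apply List.mem_of_mem_drop (i := idx)
        rw [← hm]
        exact hCmem m
    · -- start is new: mark it and recurse along its successor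
      obtain ⟨hgM, hsigR⟩ := pvSig_get hM ⟨hs0, hs1⟩
      obtain ⟨vb, hvb⟩ : ∃ vb, PySem.List.pyGet? visited start = some vb :=
        pvGet_some visited start (by rw [hlen]; exact hs0) (by rw [hlen]; exact hs1)
      have hcont : stack.contains start = false := by
        rw [← Bool.not_eq_true, List.contains_iff_mem]
        exact hin
      have hlen' : (PySem.List.pySetD visited start true).length = M.length := by
        rw [PySem.List.length_pySetD]
        exact hlen
      have hget' : ∀ x, pvInR M x →
          PySem.List.pyGet? (PySem.List.pySetD visited start true) x
            = if pvSlot M.length x = pvSlot M.length start then some true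
              else PySem.List.pyGet? visited x := by
        intro x hx
        have h := pvGet_set_slot visited start x (by rw [hlen]; exact hs0)
          (by rw [hlen]; exact hs1) (by rw [hlen]; exact hx.1) (by rw [hlen]; exact hx.2)
        rwa [hlen] at h
      have hheadeq : ((stack ++ [start]) ++ [pvSig M start]).getD 0 0
          = (stack ++ [start]).getD 0 0 := by
        rw [List.getD_eq_getElem _ _ (by simp), List.getD_eq_getElem _ _ (by simp),
          List.getElem_append_left (by simp)]
      have hchain' : ∀ j : ℕ, j ≤ (stack ++ [start]).length →
          ((stack ++ [start]) ++ [pvSig M start]).getD j 0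
            = (pvSig M)^[j] (((stack ++ [start]) ++ [pvSig M start]).getD 0 0) := by
        intro j hj
        rw [hheadeq]
        simp only [List.length_append, List.length_singleton] at hj
        rcases Nat.lt_or_ge j (stack.length + 1) with hlt | hge
        · rw [List.getD_eq_getElem _ _ (by simp; omega),
            List.getElem_append_left (by simp; omega)]
          have h1 := hchain j (by omega)
          rwa [List.getD_eq_getElem _ _ (by simp; omega)] at h1
        · have hj' : j = stack.length + 1 := by omega
          subst hj'
          rw [List.getD_eq_getElem _ _ (by simp),
            List.getElem_concat_length (by simp)]
          rw [Function.iterate_succ_apply']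
          have h1 := hchain stack.length (by omega)
          rw [List.getD_eq_getElem _ _ (by simp), List.getElem_concat_length rfl] at h1
          rw [← h1]
      obtain ⟨S, visited2, heq2, hmem2, hlen2, hmono2, hback2, hsm2, hcyc2⟩ :=
        ih (stack ++ [start]) (PySem.List.pySetD visited start true) (pvSig M start)
          hlen' hsigR
          (fun x hx => by
            rcases List.mem_append.mp hx with h | h
            · exact hstackR x h
            · simp only [List.mem_singleton] at h
              rw [h]
              exact ⟨hs0, hs1⟩)
          (by
            rw [List.nodup_append]
            refine ⟨hnd, by simp, ?_⟩
            intro a ha b hb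
            rw [List.mem_singleton] at hb
            subst hb
            intro h
            exact hin (h ▸ ha))
          (fun x hx => by
            rcases List.mem_append.mp hx with h | h
            · rw [hget' x (hstackR x h)]
              split_ifs with hxs
              · rfl
              · exact hmark x h
            · simp only [List.mem_singleton] at h
              rw [h, hget' start ⟨hs0, hs1⟩]
              simp)
          (by simpa using hchain')
          (by simp; omega)
      have hstartmark2 : PySem.List.pyGet? visited2 start = some true := by
        refine hmono2 start ⟨hs0, hs1⟩ ?_
        rw [hget' start ⟨hs0, hs1⟩]
        simp
      refine ⟨S, visited2, ?_, ?_, ?_, ?_, ?_, hstartmark2, ?_⟩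
      · simp only [pvFindCycle, hvb, hcont, Bool.and_false, if_false, hgM]
        exact heq2
      · intro v
        rw [hmem2 v]
        constructor
        · rintro ⟨⟨m, hm⟩, hcyc, hne⟩
          refine ⟨⟨m + 1, ?_⟩, hcyc, hne⟩
          rw [Function.iterate_succ_apply]
          exact hm
        · rintro ⟨⟨m, hm⟩, hcyc, hne⟩
          refine ⟨?_, hcyc, hne⟩
          match m, hm with
          | 0, hm =>
            have hvstart : start = v := by simpa using hm
            obtain ⟨L, hL1, hLfix⟩ := hcyc
            refine ⟨L - 1, ?_⟩
            rw [hvstart]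
            calc (pvSig M)^[L - 1] (pvSig M v) = (pvSig M)^[L] v := by
                  rw [← Function.iterate_succ_apply]
                  congr 1
                  omega
              _ = v := hLfix
          | m + 1, hm =>
            refine ⟨m, ?_⟩
            rwa [Function.iterate_succ_apply] at hm
      · rw [hlen2, PySem.List.length_pySetD]
      · intro x hx htrue
        refine hmono2 x hx ?_
        rw [hget' x hx]
        split_ifs with hxs
        · rfl
        · exact htrue
      · intro x hx htrue
        rcases hback2 x hx htrue with h | ⟨m, hm⟩
        · rw [hget' x hx] at h
          split_ifs at h with hxs
          · exact Or.inr ⟨0, by simpa using hxs.symm⟩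
          · exact Or.inl h
        · refine Or.inr ⟨m + 1, ?_⟩
          rwa [Function.iterate_succ_apply]
      · rintro v ⟨m, hm⟩ hcyc
        match m, hm with
        | 0, hm =>
          have hvstart : start = v := by simpa using hm
          rw [← hvstart]
          exact hstartmark2
        | m + 1, hm =>
          exact hcyc2 v ⟨m, by rwa [Function.iterate_succ_apply] at hm⟩ hcyc


-- a label with the slot of a reached label reaches the same cycle nodes
lemma pvReach_slot {M : List Int} (hM : Pre_max_permutations M) {i y v : Int}
    (hi : pvInR M i) (hy : pvInR M y)
    (hslot : ∃ m0, pvSlot M.length ((pvSig M)^[m0] i) = pvSlot M.length y)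
    (hreach : ∃ m, (pvSig M)^[m] y = v) (hcyc : pvOnCycle M v) :
    ∃ m, (pvSig M)^[m] i = v := by
  obtain ⟨m0, hm0⟩ := hslot
  obtain ⟨m, hm⟩ := hreach
  have hsig : pvSig M y = (pvSig M)^[m0 + 1] i := by
    rw [Function.iterate_succ_apply']
    exact pvSig_slotEq hy (pvIter_inR hM hi m0) hm0.symm
  match m, hm with
  | 0, hm =>
    have hvy : y = v := by simpa using hm
    obtain ⟨L, hL, hfix⟩ := hcyc
    refine ⟨(L - 1) + (m0 + 1), ?_⟩
    rw [Function.iterate_add_apply, ← hsig, hvy]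
    calc (pvSig M)^[L - 1] (pvSig M v) = (pvSig M)^[L] v := by
          rw [← Function.iterate_succ_apply]
          congr 1
          omega
      _ = v := hfix
  | m + 1, hm =>
    refine ⟨m + (m0 + 1), ?_⟩
    rw [Function.iterate_add_apply, ← hsig, ← Function.iterate_succ_apply (pvSig M) m y]
    exact hm
-- every good label is reached from a nonnegative start index
lemma pvGood_reach {M : List Int} (hM : Pre_max_permutations M) {v : Int}
    (hg : pvGood M v) :
    ∃ i : Int, (0 ≤ i ∧ i < (M.length : Int)) ∧ ∃ m, (pvSig M)^[m] i = v := by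
  obtain ⟨hvR, ⟨L, hL, hfix⟩, hne⟩ := hg
  have hpR : pvInR M ((pvSig M)^[L - 1] v) := pvIter_inR hM hvR (L - 1)
  obtain ⟨hiR, hslotEq⟩ := pvSlot_natCast hpR
  refine ⟨((pvSlot M.length ((pvSig M)^[L - 1] v) : ℕ) : Int), ?_, 1, ?_⟩
  · have := pvSlot_lt hpR
    constructor
    · positivity
    · omega
  · have hsig := pvSig_slotEq hiR hpR hslotEq
    rw [Function.iterate_one, hsig,
      ← Function.iterate_succ_apply' (pvSig M) (L - 1) v]
    calc (pvSig M)^[L - 1 + 1] v = (pvSig M)^[L] v := by congr 1; omega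
      _ = v := hfix
-- a good label reached from i is reached from the 2n-advanced point of i
lemma pvReach_through {M : List Int} (hM : Pre_max_permutations M) {i v : Int}
    (hi : pvInR M i) (hcyc : pvOnCycle M v) (m : ℕ) (hm : (pvSig M)^[m] i = v) :
    ∃ k, (pvSig M)^[k] ((pvSig M)^[2 * M.length] i) = v := by
  rcases Nat.lt_or_ge m (2 * M.length) with hlt | hge
  · obtain ⟨L, hL, hfix⟩ := hcyc
    have he : (pvSig M)^[2 * M.length - m] v = (pvSig M)^[2 * M.length] i := by
      rw [← hm, ← Function.iterate_add_apply]
      congr 1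
      omega
    refine ⟨L * (2 * M.length - m) - (2 * M.length - m), ?_⟩
    rw [← he, ← Function.iterate_add_apply]
    rw [show L * (2 * M.length - m) - (2 * M.length - m) + (2 * M.length - m)
        = L * (2 * M.length - m) by
      have h1 : 1 ≤ L := hL
      have h2 : (2 * M.length - m) ≤ L * (2 * M.length - m) := Nat.le_mul_of_pos_left _ h1
      omega]
    rw [Function.iterate_mul]
    exact Function.iterate_fixed hfix _
  · refine ⟨m - 2 * M.length, ?_⟩
    rw [← Function.iterate_add_apply, show m - 2 * M.length + 2 * M.length = m by omega]
    exact hm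

-- the do-while cycle collection: what it adds is exactly one lap of the cycle
lemma pvCollect_spec {M : List Int} (hM : Pre_max_permutations M) (t : Int) :
    ∀ (fuel : ℕ) (c : Int) (result : List Int) (d : ℕ),
    pvInR M c → result.Nodup → 1 ≤ d → d ≤ fuel → (pvSig M)^[d] c = t →
    (∀ j, 1 ≤ j → j < d → (pvSig M)^[j] c ≠ t) →
    (pvCollect M t c result fuel).Nodup ∧
    (∀ v, v ∈ pvCollect M t c result fuel ↔
      v ∈ result ∨ ∃ j, j < d ∧ (pvSig M)^[j] c = v) := by
  intro fuel
  induction fuel with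
  | zero =>
    intro c result d _ _ h1 h2 _ _
    omega
  | succ fuel ih =>
    intro c result d hc hnd h1 h2 hdfix hdmin
    have hg := pvSig_get hM hc
    by_cases hct : pvSig M c = t
    · have hd1 : d = 1 := by
        by_contra hd
        exact hdmin 1 (by omega) (by omega) (by simpa using hct)
      subst hd1
      have hred : pvCollect M t c result (fuel + 1) = PySem.Set.add result c := by
        simp [pvCollect, hg.1, hct]
      rw [hred]
      refine ⟨PySem.Set.nodup_add result c hnd, ?_⟩
      intro v
      rw [PySem.Set.mem_add]
      constructor
      · rintro (h | rfl)
        · exact Or.inl h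
        · exact Or.inr ⟨0, by omega, rfl⟩
      · rintro (h | ⟨j, hj, hjv⟩)
        · exact Or.inl h
        · have hj0 : j = 0 := by omega
          subst hj0
          exact Or.inr (by simpa using hjv.symm)
    · have hd2 : 2 ≤ d := by
        by_contra hd
        have hd1 : d = 1 := by omega
        subst hd1
        exact hct (by simpa using hdfix)
      have hred : pvCollect M t c result (fuel + 1)
          = pvCollect M t (pvSig M c) (PySem.Set.add result c) fuel := by
        simp only [pvCollect, hg.1]
        rw [if_neg (by simp [hct])]
      rw [hred]
      obtain ⟨ihnd, ihmem⟩ := ih (pvSig M c) (PySem.Set.add result c) (d - 1) hg.2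
        (PySem.Set.nodup_add result c hnd) (by omega) (by omega)
        (by
          calc (pvSig M)^[d - 1] (pvSig M c) = (pvSig M)^[d] c := by
                rw [← Function.iterate_succ_apply (pvSig M) (d - 1) c]
                congr 1
                omega
            _ = t := hdfix)
        (by
          intro j hj1 hjd h
          refine hdmin (j + 1) (by omega) (by omega) ?_
          rwa [Function.iterate_succ_apply])
      refine ⟨ihnd, ?_⟩
      intro v
      rw [ihmem v, PySem.Set.mem_add]
      constructor
      · rintro ((h | rfl) | ⟨j, hj, hjv⟩)
        · exact Or.inl h
        · exact Or.inr ⟨0, by omega, rfl⟩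
        · exact Or.inr ⟨j + 1, by omega, by rwa [Function.iterate_succ_apply]⟩
      · rintro (h | ⟨j, hj, hjv⟩)
        · exact Or.inl (Or.inl h)
        · match j, hjv with
          | 0, hjv => exact Or.inl (Or.inr hjv.symm)
          | j + 1, hjv =>
            exact Or.inr ⟨j, by omega, by rwa [Function.iterate_succ_apply] at hjv⟩

-- the loop of B collects exactly the good labels reachable from L
lemma pvLoopB_spec {M : List Int} (hM : Pre_max_permutations M) :
    ∀ (L : List Int) (result : List Int),
    (∀ i ∈ L, 0 ≤ i ∧ i < (M.length : Int)) →
    result.Nodup →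
    (L.foldl
      (fun (result : List Int) (i : Int) =>
        let t := pvAdvance M i (2 * M.length)
        match PySem.List.pyGet? M t with
        | none => result
        | some mt => if mt == t then result
          else pvCollect M t t result (2 * M.length))
      result).Nodup ∧
    (∀ v ∈ result, v ∈ L.foldl
      (fun (result : List Int) (i : Int) =>
        let t := pvAdvance M i (2 * M.length)
        match PySem.List.pyGet? M t with
        | none => result
        | some mt => if mt == t then result
          else pvCollect M t t result (2 * M.length))
      result) ∧
    (∀ v ∈ L.foldl
      (fun (result : List Int) (i : Int) =>
        let t := pvAdvance M i (2 * M.length)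
        match PySem.List.pyGet? M t with
        | none => result
        | some mt => if mt == t then result
          else pvCollect M t t result (2 * M.length))
      result, v ∈ result ∨ pvGood M v) ∧
    (∀ v, pvGood M v → (∃ i ∈ L, ∃ m, (pvSig M)^[m] i = v) → v ∈ L.foldl
      (fun (result : List Int) (i : Int) =>
        let t := pvAdvance M i (2 * M.length)
        match PySem.List.pyGet? M t with
        | none => result
        | some mt => if mt == t then result
          else pvCollect M t t result (2 * M.length))
      result) := by
  intro L
  induction L with
  | nil =>
    intro result _ hnd
    exact ⟨hnd, fun v hv => hv, fun v hv => Or.inl hv, by simp⟩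
  | cons i L' ihL =>
    intro result hLR hnd
    have hi := hLR i (by simp)
    have hiR : pvInR M i := ⟨by omega, hi.2⟩
    have hadv : pvAdvance M i (2 * M.length) = (pvSig M)^[2 * M.length] i :=
      pvAdvance_spec hM (2 * M.length) i hiR
    have htR : pvInR M ((pvSig M)^[2 * M.length] i) := pvIter_inR hM hiR _
    have htc : pvOnCycle M ((pvSig M)^[2 * M.length] i) := pvOnCycle_advance hM hiR
    have hg := pvSig_get hM htR
    by_cases hfixt : pvSig M ((pvSig M)^[2 * M.length] i) = (pvSig M)^[2 * M.length] i
    · -- the reachable cycle is a fixed point: nothing is added for i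
      have hnone : ∀ v, pvGood M v → ∀ m : ℕ, (pvSig M)^[m] i ≠ v := by
        intro v hv m hm
        obtain ⟨k, hk⟩ := pvReach_through hM hiR hv.2.1 m hm
        rw [Function.iterate_fixed hfixt] at hk
        exact hv.2.2 (by rw [← hk, hfixt])
      obtain ⟨b1, b2, b3, b4⟩ := ihL result (fun x hx => hLR x (by simp [hx])) hnd
      simp only [List.foldl_cons, hadv, hg.1]
      rw [if_pos (by simp [hfixt])]
      refine ⟨b1, b2, b3, ?_⟩
      rintro v hv ⟨i', hi', m, hm⟩
      rcases List.mem_cons.mp hi' with rfl | hi''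
      · exact absurd hm (hnone v hv m)
      · exact b4 v hv ⟨i', hi'', m, hm⟩
    · -- collect the cycle through t
      obtain ⟨d, hd1, hd2n, hdfix, hdmin⟩ := pvMinPeriod hM htR htc
      obtain ⟨cnd, cmem⟩ := pvCollect_spec hM ((pvSig M)^[2 * M.length] i)
        (2 * M.length) ((pvSig M)^[2 * M.length] i) result d htR hnd hd1 hd2n hdfix hdmin
      have hcolgood : ∀ v, (∃ j, j < d ∧ (pvSig M)^[j] ((pvSig M)^[2 * M.length] i) = v) →
          pvGood M v := by
        rintro v ⟨j, hj, hjv⟩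
        refine ⟨by rw [← hjv]; exact pvIter_inR hM htR j, by rw [← hjv]; exact pvOnCycle_iter htc j, ?_⟩
        intro hvfix
        have htv : (pvSig M)^[2 * M.length] i = v := by
          rw [← hjv]
          have hdj : (pvSig M)^[(d - j) + j] ((pvSig M)^[2 * M.length] i)
              = (pvSig M)^[2 * M.length] i := by
            rw [show (d - j) + j = d by omega]
            exact hdfix
          rw [Function.iterate_add_apply, hjv, Function.iterate_fixed hvfix] at hdj
          rw [hjv]
          exact hdj.symm
        exact hfixt (by rw [htv, hvfix])
      obtain ⟨b1, b2, b3, b4⟩ := ihL (pvCollect M ((pvSig M)^[2 * M.length] i)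
          ((pvSig M)^[2 * M.length] i) result (2 * M.length))
        (fun x hx => hLR x (by simp [hx])) cnd
      simp only [List.foldl_cons, hadv, hg.1]
      rw [if_neg (by simp [hfixt])]
      refine ⟨b1, ?_, ?_, ?_⟩
      · intro v hv
        exact b2 v ((cmem v).mpr (Or.inl hv))
      · intro v hv
        rcases b3 v hv with h | h
        · rcases (cmem v).mp h with h' | h'
          · exact Or.inl h'
          · exact Or.inr (hcolgood v h')
        · exact Or.inr h
      · rintro v hv ⟨i', hi', m, hm⟩
        rcases List.mem_cons.mp hi' with rfl | hi''
        · refine b2 v ((cmem v).mpr (Or.inr ?_))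
          obtain ⟨k, hk⟩ := pvReach_through hM hiR hv.2.1 m hm
          refine ⟨k % d, Nat.mod_lt _ (by omega), ?_⟩
          rw [← pvIterate_mod (pvSig M) d hd1 _ hdfix k]
          exact hk
        · exact b4 v hv ⟨i', hi'', m, hm⟩

-- the outer loop of A: collected = good labels reachable from any marked label or from L
lemma pvLoopA_spec {M : List Int} (hM : Pre_max_permutations M) :
    ∀ (L : List Int) (result : List Int) (visited : List Bool),
    visited.length = M.length →
    (∀ i ∈ L, 0 ≤ i ∧ i < (M.length : Int)) →
    result.Nodup →
    (∀ v ∈ result, pvGood M v) →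
    (∀ y, pvInR M y → PySem.List.pyGet? visited y = some true →
      ∀ v, pvGood M v → (∃ m, (pvSig M)^[m] y = v) → v ∈ result) →
    (L.foldl
      (fun (acc : List Int × List Bool) (i : Int) =>
        match PySem.List.pyGet? acc.2 i with
        | none => acc
        | some vis =>
          if vis then acc
          else
            match pvFindCycle M (2 * M.length + 2) i acc.2 [] with
            | none => acc
            | some (sykel, visited') => (PySem.Set.update acc.1 sykel, visited'))
      (result, visited)).1.Nodup ∧
    (∀ v ∈ (L.foldl
      (fun (acc : List Int × List Bool) (i : Int) =>
        match PySem.List.pyGet? acc.2 i with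
        | none => acc
        | some vis =>
          if vis then acc
          else
            match pvFindCycle M (2 * M.length + 2) i acc.2 [] with
            | none => acc
            | some (sykel, visited') => (PySem.Set.update acc.1 sykel, visited'))
      (result, visited)).1, pvGood M v) ∧
    (∀ y, pvInR M y → PySem.List.pyGet? (L.foldl
      (fun (acc : List Int × List Bool) (i : Int) =>
        match PySem.List.pyGet? acc.2 i with
        | none => acc
        | some vis =>
          if vis then acc
          else
            match pvFindCycle M (2 * M.length + 2) i acc.2 [] with
            | none => acc
            | some (sykel, visited') => (PySem.Set.update acc.1 sykel, visited'))
      (result, visited)).2 y = some true →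
      ∀ v, pvGood M v → (∃ m, (pvSig M)^[m] y = v) → v ∈ (L.foldl
      (fun (acc : List Int × List Bool) (i : Int) =>
        match PySem.List.pyGet? acc.2 i with
        | none => acc
        | some vis =>
          if vis then acc
          else
            match pvFindCycle M (2 * M.length + 2) i acc.2 [] with
            | none => acc
            | some (sykel, visited') => (PySem.Set.update acc.1 sykel, visited'))
      (result, visited)).1) ∧
    (L.foldl
      (fun (acc : List Int × List Bool) (i : Int) =>
        match PySem.List.pyGet? acc.2 i with
        | none => acc
        | some vis =>
          if vis then acc
          else
            match pvFindCycle M (2 * M.length + 2) i acc.2 [] with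
            | none => acc
            | some (sykel, visited') => (PySem.Set.update acc.1 sykel, visited'))
      (result, visited)).2.length = M.length ∧
    (∀ x, pvInR M x → PySem.List.pyGet? visited x = some true →
      PySem.List.pyGet? (L.foldl
      (fun (acc : List Int × List Bool) (i : Int) =>
        match PySem.List.pyGet? acc.2 i with
        | none => acc
        | some vis =>
          if vis then acc
          else
            match pvFindCycle M (2 * M.length + 2) i acc.2 [] with
            | none => acc
            | some (sykel, visited') => (PySem.Set.update acc.1 sykel, visited'))
      (result, visited)).2 x = some true) ∧
    (∀ j ∈ L, PySem.List.pyGet? (L.foldl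
      (fun (acc : List Int × List Bool) (i : Int) =>
        match PySem.List.pyGet? acc.2 i with
        | none => acc
        | some vis =>
          if vis then acc
          else
            match pvFindCycle M (2 * M.length + 2) i acc.2 [] with
            | none => acc
            | some (sykel, visited') => (PySem.Set.update acc.1 sykel, visited'))
      (result, visited)).2 j = some true) := by
  intro L
  induction L with
  | nil =>
    intro result visited hlen hLR hnd hgood hinv
    exact ⟨hnd, hgood, hinv, hlen, fun x _ h => h, by simp⟩
  | cons i L' ihL =>
    intro result visited hlen hLR hnd hgood hinv
    have hi := hLR i (by simp)
    have hiR : pvInR M i := ⟨by omega, hi.2⟩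
    obtain ⟨vb, hgeti⟩ : ∃ vb, PySem.List.pyGet? visited i = some vb :=
      pvGet_some visited i (by rw [hlen]; exact hiR.1) (by rw [hlen]; exact hiR.2)
    cases vb with
    | true =>
      obtain ⟨c1, c2, c3, c4, c5, c6⟩ := ihL result visited hlen
        (fun x hx => hLR x (by simp [hx])) hnd hgood hinv
      simp only [List.foldl_cons, hgeti]
      rw [if_pos trivial]
      refine ⟨c1, c2, c3, c4, c5, ?_⟩
      intro j hj
      rcases List.mem_cons.mp hj with rfl | hj'
      · exact c5 j hiR hgeti
      · exact c6 j hj'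
    | false =>
      obtain ⟨S, visited', heqF, hmemF, hlenF, hmonoF, hbackF, hsmF, -⟩ :=
        pvFindCycle_spec hM (2 * M.length + 2) [] visited i hlen hiR (by simp) (by simp)
          (by simp)
          (by
            intro j hj
            simp only [List.length_nil, Nat.le_zero] at hj
            subst hj
            simp)
          (by simp)
      have hlen'' : visited'.length = M.length := by rw [hlenF, hlen]
      have hgood' : ∀ v ∈ PySem.Set.update result S, pvGood M v := by
        intro v hv
        rcases (PySem.Set.mem_update result S v).mp hv with h | h
        · exact hgood v h
        · obtain ⟨⟨m, hm⟩, hcyc, hne⟩ := (hmemF v).mp h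
          refine ⟨?_, hcyc, hne⟩
          rw [← hm]
          exact pvIter_inR hM hiR m
      have hinv' : ∀ y, pvInR M y → PySem.List.pyGet? visited' y = some true →
          ∀ v, pvGood M v → (∃ m, (pvSig M)^[m] y = v) → v ∈ PySem.Set.update result S := by
        intro y hy hty v hv hreach
        rcases hbackF y hy hty with h | h
        · exact (PySem.Set.mem_update result S v).mpr (Or.inl (hinv y hy h v hv hreach))
        · refine (PySem.Set.mem_update result S v).mpr (Or.inr ((hmemF v).mpr
            ⟨?_, hv.2.1, hv.2.2⟩))
          exact pvReach_slot hM hiR hy h hreach hv.2.1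
      obtain ⟨c1, c2, c3, c4, c5, c6⟩ := ihL (PySem.Set.update result S) visited' hlen''
        (fun x hx => hLR x (by simp [hx])) (PySem.Set.nodup_update result S hnd)
        hgood' hinv'
      simp only [List.foldl_cons, hgeti]
      rw [if_neg (by simp)]
      simp only [heqF]
      refine ⟨c1, c2, c3, c4, ?_, ?_⟩
      · intro x hx ht
        exact c5 x hx (hmonoF x hx ht)
      · intro j hj
        rcases List.mem_cons.mp hj with rfl | hj'
        · exact c5 j hiR hsmF
        · exact c6 j hj'

-- ===== VERDICT (by name: the statement is the Claim_ definition above) =====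
theorem max_permutations_spec : Claim_equal_max_permutations := by
  unfold Claim_equal_max_permutations
  intro M _ hM
  unfold Spec_max_permutations
  have hA := pvLoopA_spec hM (PySem.List.pyRange 0 (M.length : Int) 1) []
    (List.replicate M.length false)
    (by simp)
    (fun i hi => by
      rw [PySem.List.mem_pyRange_one] at hi; exact ⟨hi.1, hi.2⟩)
    (by simp)
    (by simp)
    (fun y hy hty v _ _ => by
      exfalso
      rw [pvGet_slot _ y (by simpa using hy.1) (by simpa using hy.2)] at hty
      rw [List.getElem?_replicate] at hty
      split_ifs at hty <;> simp at hty)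
  have hB := pvLoopB_spec hM (PySem.List.pyRange 0 (M.length : Int) 1) []
    (fun i hi => by
      rw [PySem.List.mem_pyRange_one] at hi; exact ⟨hi.1, hi.2⟩)
    (by simp)
  obtain ⟨hAnd, hAgood, hAinv, _, _, hAmarked⟩ := hA
  obtain ⟨hBnd, _, hBgood, hBcomplete⟩ := hB
  unfold max_permutations max_permutations_alt
  dsimp only
  refine PySem.List.sorted_eq_sorted_of_perm _ _ (fun x => x) (fun a b h => h) ?_
  refine (List.perm_ext_iff_of_nodup hAnd hBnd).mpr ?_
  intro v
  constructor
  · intro hv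
    have hg := hAgood v hv
    obtain ⟨i, hi, hm⟩ := pvGood_reach hM hg
    refine hBcomplete v hg ⟨i, ?_, hm⟩
    rw [PySem.List.mem_pyRange_one]
    exact hi
  · intro hv
    rcases hBgood v hv with h | hg
    · simp at h
    · obtain ⟨i, hi, hm⟩ := pvGood_reach hM hg
      have hiL : i ∈ PySem.List.pyRange 0 (M.length : Int) 1 := by
        rw [PySem.List.mem_pyRange_one]; exact hi
      exact hAinv i ⟨by omega, hi.2⟩ (hAmarked i hiL) v hg hm
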